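-- pv_equiv track=rewrite | github.com/BlueBlazin/pyrs | scripts/audit_proxy_dunders.py | compare_surfaces
-- ===== SOURCE A (Python) =====
-- def compare_surfaces(
--     cpython: dict[str, dict[str, bool]],
--     pyrs: dict[str, dict[str, bool]],
-- ) -> tuple[list[dict[str, object]], list[dict[str, object]]]:
--     missing_in_pyrs: list[dict[str, object]] = []
--     extra_in_pyrs: list[dict[str, object]] = []
--     for target in sorted(cpython.keys()):
--         c_target = cpython.get(target, {})
--         p_target = pyrs.get(target, {})
--         for attr in sorted(set(c_target.keys()) | set(p_target.keys())):
--             c_has = bool(c_target.get(attr, False))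
--             p_has = bool(p_target.get(attr, False))
--             if c_has and not p_has:
--                 missing_in_pyrs.append({"target": target, "attr": attr})
--             elif p_has and not c_has:
--                 extra_in_pyrs.append({"target": target, "attr": attr})
--     return missing_in_pyrs, extra_in_pyrs
-- ===== SOURCE B (Python) =====
-- def compare_surfaces(
--     cpython: dict[str, dict[str, bool]],
--     pyrs: dict[str, dict[str, bool]],
-- ) -> tuple[list[dict[str, object]], list[dict[str, object]]]:
--     missing_in_pyrs: list[dict[str, object]] = []
--     extra_in_pyrs: list[dict[str, object]] = []
--     for target in sorted(cpython):
--         c_on = {a for a, v in cpython[target].items() if v}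
--         p_on = {a for a, v in pyrs.get(target, {}).items() if v}
--         missing_in_pyrs += [{"target": target, "attr": a} for a in sorted(c_on - p_on)]
--         extra_in_pyrs += [{"target": target, "attr": a} for a in sorted(p_on - c_on)]
--     return missing_in_pyrs, extra_in_pyrs
-- ===== Notes on version B (the rewrite author's own statement) =====
-- stated objective: simpler
-- what changed: Replaces the per-attribute union loop with flag branches by building the two truthy-attribute sets per target and appending the sorted set differences wholesale.
import Mathlib
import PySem

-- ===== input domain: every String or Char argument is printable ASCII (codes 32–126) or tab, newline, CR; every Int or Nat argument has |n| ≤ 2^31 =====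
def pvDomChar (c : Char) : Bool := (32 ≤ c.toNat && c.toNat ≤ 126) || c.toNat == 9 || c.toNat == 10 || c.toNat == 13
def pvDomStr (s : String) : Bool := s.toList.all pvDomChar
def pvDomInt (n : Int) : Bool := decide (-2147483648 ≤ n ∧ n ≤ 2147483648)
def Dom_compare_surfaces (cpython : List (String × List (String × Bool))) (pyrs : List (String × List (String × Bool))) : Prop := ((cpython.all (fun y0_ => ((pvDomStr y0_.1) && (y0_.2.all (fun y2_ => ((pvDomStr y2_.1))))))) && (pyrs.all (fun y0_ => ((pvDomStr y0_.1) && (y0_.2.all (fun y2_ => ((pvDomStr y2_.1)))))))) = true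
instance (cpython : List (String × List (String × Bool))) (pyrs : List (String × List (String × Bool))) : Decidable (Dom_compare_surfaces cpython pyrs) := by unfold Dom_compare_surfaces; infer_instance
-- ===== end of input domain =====

-- B replaces A's per-attribute union loop (with if/elif flag branches) by two truthy-attr
-- sets per target whose sorted differences are appended wholesale: simpler decomposition.

-- ===== PORT A =====
def compare_surfaces (cpython : List (String × List (String × Bool))) (pyrs : List (String × List (String × Bool))) : (List (List (String × String))) × (List (List (String × String))) :=
  let cd := PySem.Dict.ofList cpython
  let pd := PySem.Dict.ofList pyrs
  (PySem.List.sorted cd.keys (fun x => x) false).foldl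
    (fun acc target =>
      let cT := PySem.Dict.ofList (cd.getD target [])
      let pT := PySem.Dict.ofList (pd.getD target [])
      (PySem.List.sorted (PySem.Set.union (PySem.Set.ofList cT.keys) (PySem.Set.ofList pT.keys)) (fun x => x) false).foldl
        (fun acc2 attr =>
          let cHas := cT.getD attr false
          let pHas := pT.getD attr false
          if cHas && !pHas then (acc2.1 ++ [[("target", target), ("attr", attr)]], acc2.2)
          else if pHas && !cHas then (acc2.1, acc2.2 ++ [[("target", target), ("attr", attr)]])
          else acc2) acc)
    ([], [])

-- ===== PORT B =====
def compare_surfaces_alt (cpython : List (String × List (String × Bool))) (pyrs : List (String × List (String × Bool))) : (List (List (String × String))) × (List (List (String × String))) :=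
  let cd := PySem.Dict.ofList cpython
  let pd := PySem.Dict.ofList pyrs
  (PySem.List.sorted cd.keys (fun x => x) false).foldl
    (fun acc target =>
      let cOn := PySem.Set.ofList (((PySem.Dict.ofList (cd.getD target [])).items.filter (fun p => p.2)).map (fun p => p.1))
      let pOn := PySem.Set.ofList (((PySem.Dict.ofList (pd.getD target [])).items.filter (fun p => p.2)).map (fun p => p.1))
      (acc.1 ++ (PySem.List.sorted (PySem.Set.diff cOn pOn) (fun x => x) false).map (fun a => [("target", target), ("attr", a)]),
       acc.2 ++ (PySem.List.sorted (PySem.Set.diff pOn cOn) (fun x => x) false).map (fun a => [("target", target), ("attr", a)])))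
    ([], [])

-- ===== PRECONDITION & SPEC =====
def Spec_compare_surfaces (cpython : List (String × List (String × Bool))) (pyrs : List (String × List (String × Bool))) (out : (List (List (String × String))) × (List (List (String × String)))) : Prop := out = compare_surfaces_alt cpython pyrs
instance (cpython : List (String × List (String × Bool))) (pyrs : List (String × List (String × Bool))) (out : (List (List (String × String))) × (List (List (String × String)))) : Decidable (Spec_compare_surfaces cpython pyrs out) := by unfold Spec_compare_surfaces; infer_instance

-- ===== CLAIM (what is proved, stated in full; the proofs are below) =====
def Claim_equal_compare_surfaces : Prop := ∀ (cpython : List (String × List (String × Bool))) (pyrs : List (String × List (String × Bool))), Dom_compare_surfaces cpython pyrs → Spec_compare_surfaces cpython pyrs (compare_surfaces cpython pyrs)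

-- ===== LEMMAS AND PROOFS =====

-- the truthy-attr set of a dict: membership ↔ the lookup A makes is truthy
lemma mem_onSet (d : PySem.Dict String Bool) (hd : d.keys.Nodup) (a : String) :
    a ∈ PySem.Set.ofList ((d.items.filter (fun p => p.2)).map (fun p => p.1)) ↔ d.getD a false = true := by
  rw [PySem.Set.mem_ofList]
  simp only [List.mem_map, List.mem_filter]
  constructor
  · rintro ⟨⟨k, v⟩, ⟨hm, hv⟩, rfl⟩
    simp only at hv
    subst hv
    rw [PySem.Dict.getD_eq_get?_getD, PySem.Dict.get?_of_mem_items d hm hd]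
    rfl
  · intro h
    have hs : d.get? a = some true := by
      rw [PySem.Dict.getD_eq_get?_getD] at h
      cases hg : d.get? a with
      | none => rw [hg] at h; simp at h
      | some b => rw [hg] at h; simp only [Option.getD_some] at h; rw [h]
    exact ⟨(a, true), ⟨PySem.Dict.mem_items_of_get?_eq_some d hs, rfl⟩, rfl⟩

lemma truthy_mem_keys (d : PySem.Dict String Bool) (a : String) (h : d.getD a false = true) :
    a ∈ d.keys := by
  by_contra hk
  rw [PySem.Dict.getD_eq_get?_getD,
      (PySem.Dict.get?_eq_none_iff_not_mem_keys d a).mpr hk] at h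
  simp at h

-- A's inner loop over a pair accumulator, as two filters
lemma pairFold (p q : String → Bool) (f : String → List (String × String)) :
    ∀ (U : List String) (acc : List (List (String × String)) × List (List (String × String))),
      U.foldl (fun acc2 x => if p x then (acc2.1 ++ [f x], acc2.2) else if q x then (acc2.1, acc2.2 ++ [f x]) else acc2) acc
        = (acc.1 ++ (U.filter p).map f, acc.2 ++ (U.filter (fun x => !p x && q x)).map f)
  | [], acc => by simp
  | x :: U, acc => by
    simp only [List.foldl_cons, List.filter_cons]
    cases hp : p x <;> cases hq : q x <;>
      simp [pairFold p q f U]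

-- the sorted union list is strictly increasing
lemma sortedU_lt (s t : List String) (hs : s.Nodup) :
    (PySem.List.sorted (PySem.Set.union s t) (fun x => x) false).Pairwise (· < ·) := by
  have hperm := PySem.List.sorted_perm (xs := PySem.Set.union s t) (key := fun x => x) (rev := false)
  have hnd : (PySem.List.sorted (PySem.Set.union s t) (fun x => x) false).Nodup :=
    hperm.nodup_iff.mpr (PySem.Set.nodup_union _ _ hs)
  have hle := PySem.List.sorted_pairwise (xs := PySem.Set.union s t) (key := fun x => x)
  exact (hle.and hnd).imp (fun h => lt_of_le_of_ne h.1 h.2)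

-- the filtered sorted union IS the sorted set difference of the truthy sets
lemma filter_eq_sorted_diff (cT pT : PySem.Dict String Bool)
    (hc : cT.keys.Nodup) (hp : pT.keys.Nodup) :
    (PySem.List.sorted (PySem.Set.union (PySem.Set.ofList cT.keys) (PySem.Set.ofList pT.keys)) (fun x => x) false).filter
        (fun a => cT.getD a false && !pT.getD a false)
      = PySem.List.sorted
          (PySem.Set.diff (PySem.Set.ofList ((cT.items.filter (fun p => p.2)).map (fun p => p.1)))
                          (PySem.Set.ofList ((pT.items.filter (fun p => p.2)).map (fun p => p.1))))
          (fun x => x) false := by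
  symm
  apply PySem.List.sorted_eq_of_perm_of_pairwise_lt
  · -- the filter is a permutation of the set difference
    have hU : (PySem.List.sorted (PySem.Set.union (PySem.Set.ofList cT.keys) (PySem.Set.ofList pT.keys)) (fun x => x) false).Nodup :=
      (sortedU_lt (PySem.Set.ofList cT.keys) (PySem.Set.ofList pT.keys) (PySem.Set.nodup_ofList _)).imp
        (fun h => ne_of_lt h)
    refine (List.perm_ext_iff_of_nodup (hU.filter _) (PySem.Set.nodup_diff _ _ (PySem.Set.nodup_ofList _))).mpr ?_
    intro a
    rw [List.mem_filter, PySem.List.mem_sorted, PySem.Set.mem_union, PySem.Set.mem_diff,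
        mem_onSet cT hc, mem_onSet pT hp, PySem.Set.mem_ofList, PySem.Set.mem_ofList]
    constructor
    · rintro ⟨-, h⟩
      simp only [Bool.and_eq_true, Bool.not_eq_true'] at h
      exact ⟨h.1, by simp [h.2]⟩
    · rintro ⟨h1, h2⟩
      refine ⟨Or.inl (truthy_mem_keys cT a h1), ?_⟩
      simp only [Bool.and_eq_true, Bool.not_eq_true']
      exact ⟨h1, by revert h2; cases pT.getD a false <;> simp⟩
  · exact (sortedU_lt _ _ (PySem.Set.nodup_ofList _)).filter _

lemma bool_elif (b c : Bool) : (!(b && !c) && (c && !b)) = (c && !b) := by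
  cases b <;> cases c <;> rfl

-- per-target: A's inner loop equals B's two appended blocks
lemma step_eq (cT pT : PySem.Dict String Bool) (hc : cT.keys.Nodup) (hp : pT.keys.Nodup)
    (target : String) (acc : List (List (String × String)) × List (List (String × String))) :
    (PySem.List.sorted (PySem.Set.union (PySem.Set.ofList cT.keys) (PySem.Set.ofList pT.keys)) (fun x => x) false).foldl
        (fun acc2 attr =>
          if cT.getD attr false && !pT.getD attr false then (acc2.1 ++ [[("target", target), ("attr", attr)]], acc2.2)
          else if pT.getD attr false && !cT.getD attr false then (acc2.1, acc2.2 ++ [[("target", target), ("attr", attr)]])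
          else acc2) acc
      = (acc.1 ++ (PySem.List.sorted
            (PySem.Set.diff (PySem.Set.ofList ((cT.items.filter (fun p => p.2)).map (fun p => p.1)))
                            (PySem.Set.ofList ((pT.items.filter (fun p => p.2)).map (fun p => p.1)))) (fun x => x) false).map
            (fun a => [("target", target), ("attr", a)]),
         acc.2 ++ (PySem.List.sorted
            (PySem.Set.diff (PySem.Set.ofList ((pT.items.filter (fun p => p.2)).map (fun p => p.1)))
                            (PySem.Set.ofList ((cT.items.filter (fun p => p.2)).map (fun p => p.1)))) (fun x => x) false).map
            (fun a => [("target", target), ("attr", a)])) := by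
  rw [pairFold (fun attr => cT.getD attr false && !pT.getD attr false)
               (fun attr => pT.getD attr false && !cT.getD attr false)
               (fun attr => [("target", target), ("attr", attr)])]
  have hfe : (fun x => !(cT.getD x false && !pT.getD x false) && (pT.getD x false && !cT.getD x false))
      = (fun x => pT.getD x false && !cT.getD x false) := by
    funext x; exact bool_elif (cT.getD x false) (pT.getD x false)
  have hswap : PySem.List.sorted (PySem.Set.union (PySem.Set.ofList cT.keys) (PySem.Set.ofList pT.keys)) (fun x => x) false
      = PySem.List.sorted (PySem.Set.union (PySem.Set.ofList pT.keys) (PySem.Set.ofList cT.keys)) (fun x => x) false := by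
    apply PySem.List.sorted_eq_sorted_of_perm _ _ _ (fun a b h => h)
    refine (List.perm_ext_iff_of_nodup (PySem.Set.nodup_union _ _ (PySem.Set.nodup_ofList _))
      (PySem.Set.nodup_union _ _ (PySem.Set.nodup_ofList _))).mpr ?_
    intro a
    rw [PySem.Set.mem_union, PySem.Set.mem_union]
    exact Or.comm
  rw [hfe, filter_eq_sorted_diff cT pT hc hp, hswap, filter_eq_sorted_diff pT cT hp hc]

theorem compare_surfaces_spec : Claim_equal_compare_surfaces := by
  intro cpython pyrs _
  unfold Spec_compare_surfaces compare_surfaces compare_surfaces_alt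
  apply PySem.List.foldl_congr_mem
  intro acc target _
  exact step_eq _ _ (PySem.Dict.nodup_keys_ofList _) (PySem.Dict.nodup_keys_ofList _) target acc
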